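-- pv_equiv track=rewrite | github.com/Weber12321/image_ai_playground | trocr/metric.py | calculate_match_words
-- ===== SOURCE A (Python) =====
-- def calculate_match_words(pred_str, label_str):
--     n_match_words = 0
--
--     pred_words = list(pred_str.split())
--     ref_words = list(label_str.split())
--     n_gt_words = len(ref_words)
--     n_detected_words = len(pred_words)
--
--     for pred_w in pred_words:
--         if pred_w in ref_words:
--             n_match_words += 1
--             ref_words.remove(pred_w)
--
--     return n_gt_words, n_detected_words, n_match_words
-- ===== SOURCE B (Python) =====
-- def calculate_match_words(pred_str, label_str):
--     pred_words = pred_str.split()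
--     ref_words = label_str.split()
--
--     counts = {}
--     for w in pred_words:
--         counts[w] = counts.get(w, 0) + 1
--
--     n_match_words = 0
--     for w, c in counts.items():
--         n_match_words += min(c, ref_words.count(w))
--
--     return len(ref_words), len(pred_words), n_match_words
-- ===== Notes on version B (the rewrite author's own statement) =====
-- stated objective: alternative
-- what changed: Replaces A's destructive scan-and-remove loop over a mutable reference list with a word-frequency dictionary built over the prediction and a closed sum of min(pred_count, ref_count) over its distinct keys.
import Mathlib
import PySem

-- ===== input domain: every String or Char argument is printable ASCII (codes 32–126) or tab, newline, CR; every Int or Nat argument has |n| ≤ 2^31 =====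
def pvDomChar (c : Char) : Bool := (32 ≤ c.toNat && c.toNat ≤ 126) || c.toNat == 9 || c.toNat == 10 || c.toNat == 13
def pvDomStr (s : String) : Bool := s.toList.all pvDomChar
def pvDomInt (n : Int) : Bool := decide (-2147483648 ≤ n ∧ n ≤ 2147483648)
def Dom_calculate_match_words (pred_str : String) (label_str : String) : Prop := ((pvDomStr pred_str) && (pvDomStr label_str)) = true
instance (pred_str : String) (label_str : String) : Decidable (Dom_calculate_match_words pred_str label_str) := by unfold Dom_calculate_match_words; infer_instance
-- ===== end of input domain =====

-- B counts matches as a sum of per-word minimum frequencies instead of A's remove-loop; alternative decomposition, same result.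
-- ===== PORT A =====
def calculate_match_words (pred_str : String) (label_str : String) : List Int :=
  let pred_words := PySem.Str.split₀ pred_str
  let ref_words := PySem.Str.split₀ label_str
  let n_gt_words : Int := ref_words.length
  let n_detected_words : Int := pred_words.length
  -- the loop state is (n_match_words, ref_words); `ref_words.remove(pred_w)` is guarded by `pred_w in ref_words`
  let st := pred_words.foldl
    (fun (st : Int × List String) pred_w =>
      if pred_w ∈ st.2 then (st.1 + 1, (PySem.List.remove? st.2 pred_w).getD st.2) else st)
    (0, ref_words)
  [n_gt_words, n_detected_words, st.1]

-- ===== PORT B =====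
def calculate_match_words_alt (pred_str : String) (label_str : String) : List Int :=
  let pred_words := PySem.Str.split₀ pred_str
  let ref_words := PySem.Str.split₀ label_str
  let counts : PySem.Dict String Int :=
    pred_words.foldl (fun d w => d.insert w (d.getD w 0 + 1)) PySem.Dict.empty
  let n_match_words : Int :=
    counts.items.foldl (fun n wc => n + min wc.2 (ref_words.count wc.1 : Int)) 0
  [(ref_words.length : Int), (pred_words.length : Int), n_match_words]

-- ===== PRECONDITION & SPEC =====
def Spec_calculate_match_words (pred_str : String) (label_str : String) (out : List Int) : Prop := out = calculate_match_words_alt pred_str label_str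
instance (pred_str : String) (label_str : String) (out : List Int) : Decidable (Spec_calculate_match_words pred_str label_str out) := by unfold Spec_calculate_match_words; infer_instance

-- ===== CLAIM (what is proved, stated in full; the proofs are below) =====
def Claim_equal_calculate_match_words : Prop := ∀ (pred_str : String) (label_str : String), Dom_calculate_match_words pred_str label_str → Spec_calculate_match_words pred_str label_str (calculate_match_words pred_str label_str)

-- ===== LEMMAS AND PROOFS =====

-- A's loop computes the size of the multiset intersection (List.bagInter).
theorem loopA_eq_bagInter (p : List String) : ∀ (r : List String) (n : Int),
    (p.foldl
      (fun (st : Int × List String) w =>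
        if w ∈ st.2 then (st.1 + 1, (PySem.List.remove? st.2 w).getD st.2) else st)
      (n, r)).1 = n + ((p.bagInter r).length : Int) := by
  induction p with
  | nil => intro r n; simp [List.nil_bagInter]
  | cons a p ih =>
    intro r n
    by_cases h : a ∈ r
    · simp only [List.foldl_cons, if_pos h, PySem.List.remove?_eq_some_erase r a h,
        Option.getD_some, List.cons_bagInter_of_pos _ h, List.length_cons]
      rw [ih]; push_cast; ring
    · simp only [List.foldl_cons, if_neg h, List.cons_bagInter_of_neg _ h]
      exact ih r n

-- sum of the indicator of x over a duplicate-free list containing x is 1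
theorem sum_indicator (x : String) : ∀ (l : List String), l.Nodup → x ∈ l →
    (l.map (fun w => if w = x then 1 else 0)).sum = 1 := by
  intro l
  induction l with
  | nil => intro _ h; cases h
  | cons a l ih =>
    intro hnd hx
    rcases List.mem_cons.1 hx with rfl | hx
    · have hnotin : x ∉ l := (List.nodup_cons.1 hnd).1
      have hz : (l.map (fun w => if w = x then 1 else 0)).sum = 0 := by
        apply List.sum_eq_zero
        intro y hy
        rcases List.mem_map.1 hy with ⟨w, hw, rfl⟩
        have : w ≠ x := fun e => hnotin (e ▸ hw)
        simp [this]
      simp [hz]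
    · have ha : a ≠ x := fun e => (List.nodup_cons.1 hnd).1 (e ▸ hx)
      simp [ha, ih (List.nodup_cons.1 hnd).2 hx]

-- summing m.count over a nodup list covering m's elements gives m.length
theorem sum_count_nodup (l : List String) (hl : l.Nodup) : ∀ (m : List String),
    (∀ x ∈ m, x ∈ l) → (l.map (fun w => m.count w)).sum = m.length := by
  intro m
  induction m with
  | nil => intro _; simp
  | cons x m ih =>
    intro hm
    have hx : x ∈ l := hm x (List.mem_cons_self ..)
    have hcnt : (l.map (fun w => (x :: m).count w)).sum
        = (l.map (fun w => m.count w)).sum + (l.map (fun w => if w = x then 1 else 0)).sum := by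
      simp only [List.count_cons]
      rw [← List.sum_map_add]
      apply congrArg List.sum
      apply List.map_congr_left
      intro w _
      by_cases h : w = x
      · subst h; simp
      · have h' : (x == w) = false := beq_eq_false_iff_ne.mpr (fun e => h e.symm)
        simp only [h', Bool.false_eq_true, if_false, if_neg h]
    rw [hcnt, ih (fun y hy => hm y (List.mem_cons_of_mem _ hy)), sum_indicator x l hl hx,
      List.length_cons]

-- length of bagInter = sum over distinct p-words of the min of the two counts
theorem length_bagInter_eq_sum (p r : List String) :
    ((p.bagInter r).length : Int)
      = ((PySem.Set.ofList p).map (fun w => min ((p.count w : Int)) ((r.count w : Int)))).sum := by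
  have h1 : (p.bagInter r).length
      = ((PySem.List.dedup p).map (fun w => (p.bagInter r).count w)).sum := by
    rw [sum_count_nodup _ (PySem.List.nodup_dedup p) _
      (fun x hx => (PySem.List.mem_dedup p x).2 (List.mem_bagInter.1 hx).1)]
  rw [← PySem.List.dedup_eq_ofList, h1, Nat.cast_list_sum, List.map_map]
  apply congrArg List.sum
  apply List.map_congr_left
  intro w _
  have h2 : (p.bagInter r).count w = min (p.count w) (r.count w) := List.count_bagInter
  simp [Function.comp, h2, Nat.cast_min]

-- B's counter loop sums the same min over the same distinct words
theorem altLoop_eq_sum (p r : List String) :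
    ((p.foldl (fun d w => d.insert w (d.getD w 0 + 1)) PySem.Dict.empty).items.foldl
        (fun n wc => n + min wc.2 ((r.count wc.1 : Int))) 0)
      = ((PySem.Set.ofList p).map (fun w => min ((p.count w : Int)) ((r.count w : Int)))).sum := by
  rw [PySem.Dict.foldl_insert_getD_add_one_eq_counter, PySem.Dict.items_counter,
    PySem.List.foldl_add, List.map_map]
  simp [Function.comp_def]

-- ===== VERDICT (by name: the statement is the Claim_ definition above) =====
theorem calculate_match_words_spec : Claim_equal_calculate_match_words := by
  intro pred_str label_str _
  unfold Spec_calculate_match_words calculate_match_words calculate_match_words_alt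
  simp only
  rw [loopA_eq_bagInter, altLoop_eq_sum, length_bagInter_eq_sum]
  simp
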